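-- pv_equiv track=rewrite | github.com/0BigMax0/sGA | sGA_model.py | tourTotrips
-- ===== SOURCE A (Python) =====
-- def tourTotrips(tour,hotel_number):
--     temp_trip_sets = []
--     start = 0
--     #将tour分割成trip
--     for i in range(1,len(tour)):
--         if tour[i] < hotel_number:
--             temp_trip_sets.append(tour[start:i+1])
--             start = i
--     return temp_trip_sets
-- ===== SOURCE B (Python) =====
-- def tourTotrips(tour, hotel_number):
--     if not tour:
--         return []
--     trips = []
--     cur = [tour[0]]
--     for x in tour[1:]:
--         cur.append(x)
--         if x < hotel_number:
--             trips.append(cur)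
--             cur = [x]
--     return trips
-- ===== Notes on version B (the rewrite author's own statement) =====
-- stated objective: alternative
-- what changed: A cuts the tour by index arithmetic and slicing (a running 'start' pointer plus tour[start:i+1] slices); B never computes indices or slices: it streams the elements once, growing the current trip element by element and emitting/restarting it whenever an element is below hotel_number.
import Mathlib
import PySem

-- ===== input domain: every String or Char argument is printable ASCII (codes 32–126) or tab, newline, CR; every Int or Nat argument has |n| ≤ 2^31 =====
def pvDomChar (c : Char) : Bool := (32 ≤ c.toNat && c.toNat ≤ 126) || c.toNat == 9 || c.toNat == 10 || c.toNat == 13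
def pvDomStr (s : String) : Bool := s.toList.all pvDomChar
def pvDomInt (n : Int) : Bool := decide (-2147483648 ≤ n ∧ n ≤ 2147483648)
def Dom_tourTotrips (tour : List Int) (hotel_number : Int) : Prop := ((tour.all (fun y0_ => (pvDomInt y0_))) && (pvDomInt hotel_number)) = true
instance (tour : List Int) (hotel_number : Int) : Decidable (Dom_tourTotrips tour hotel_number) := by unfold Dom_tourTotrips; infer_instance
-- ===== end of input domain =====

-- B replaces A's index-and-slice cutting (running 'start' pointer, tour[start:i+1])
-- by a single element-wise stream that grows the current trip and emits/restarts it
-- at each hotel element (alternative decomposition, same cost).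

-- ===== PORT A =====
-- tour[i] is always in range here (i ∈ range(1, len(tour))), so pyGetD with default 0 is exact.
def tourTotrips (tour : List Int) (hotel_number : Int) : List (List Int) :=
  ((PySem.List.pyRange 1 (tour.length : Int) 1).foldl
    (fun (st : List (List Int) × Int) i =>
      if PySem.List.pyGetD tour i 0 < hotel_number then
        (st.1 ++ [PySem.List.slice tour (some st.2) (some (i + 1))], i)
      else st) ([], 0)).1

-- ===== PORT B =====
-- the for-loop over tour[1:] with state (trips, cur); 'if not tour: return []' is the [] match.
def tourTotripsGo (hotel : Int) (trips : List (List Int)) (cur : List Int) : List Int → List (List Int)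
  | [] => trips
  | x :: rest =>
    if x < hotel then tourTotripsGo hotel (trips ++ [cur ++ [x]]) [x] rest
    else tourTotripsGo hotel trips (cur ++ [x]) rest

def tourTotrips_alt (tour : List Int) (hotel_number : Int) : List (List Int) :=
  match tour with
  | [] => []
  | h :: t => tourTotripsGo hotel_number [] [h] t

-- ===== PRECONDITION & SPEC =====
def Spec_tourTotrips (tour : List Int) (hotel_number : Int) (out : List (List Int)) : Prop := out = tourTotrips_alt tour hotel_number
instance (tour : List Int) (hotel_number : Int) (out : List (List Int)) : Decidable (Spec_tourTotrips tour hotel_number out) := by unfold Spec_tourTotrips; infer_instance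

-- ===== CLAIM (what is proved, stated in full; the proofs are below) =====
def Claim_equal_tourTotrips : Prop := ∀ (tour : List Int) (hotel_number : Int), Dom_tourTotrips tour hotel_number → Spec_tourTotrips tour hotel_number (tourTotrips tour hotel_number)

-- ===== LEMMAS AND PROOFS =====

-- Common reference: trips from a start pointer and the list of kept breakpoint indices.
def tripsRec (tour : List Int) (s : Int) : List Int → List (List Int)
  | [] => []
  | i :: rest => PySem.List.slice tour (some s) (some (i + 1)) :: tripsRec tour i rest

theorem foldA_eq_tripsRec (tour : List Int) (hotel_number : Int) :
    ∀ (l : List Int) (acc : List (List Int)) (s : Int),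
      (l.foldl
        (fun (st : List (List Int) × Int) i =>
          if PySem.List.pyGetD tour i 0 < hotel_number then
            (st.1 ++ [PySem.List.slice tour (some st.2) (some (i + 1))], i)
          else st) (acc, s)).1
      = acc ++ tripsRec tour s
          (l.filter (fun i => decide (PySem.List.pyGetD tour i 0 < hotel_number))) := by
  intro l
  induction l with
  | nil => intro acc s; simp [tripsRec]
  | cons i rest ih =>
    intro acc s
    by_cases h : PySem.List.pyGetD tour i 0 < hotel_number
    · simp [List.foldl, h, ih, tripsRec]
    · simp [List.foldl, h, ih]

-- slice tour s (j+1) = slice tour s j ++ [tour[j]]  (natural bounds, s ≤ j < length)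
theorem slice_snoc (tour : List Int) (s j : ℕ) (x : Int)
    (hx : tour.drop j = x :: (tour.drop (j + 1))) (hs : s ≤ j) :
    PySem.List.slice tour (some (s : Int)) (some ((j + 1 : ℕ) : Int))
      = PySem.List.slice tour (some (s : Int)) (some (j : Int)) ++ [x] := by
  rw [PySem.List.slice_natCast, PySem.List.slice_natCast]
  have htj : tour[j]? = some x := by
    have h0 : (tour.drop j)[0]? = some x := by rw [hx]; rfl
    rw [List.getElem?_drop] at h0
    simpa using h0
  have hget : (tour.drop s)[j - s]? = some x := by
    rw [List.getElem?_drop]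
    have hss : s + (j - s) = j := by omega
    rw [hss]; exact htj
  have h2 : j + 1 - s = (j - s) + 1 := by omega
  rw [h2, List.take_add_one, hget]
  rfl

theorem goB_eq_tripsRec (tour : List Int) (hotel : Int) :
    ∀ (t : List Int) (j s : ℕ) (acc : List (List Int)),
      tour.drop j = t → s ≤ j →
      tourTotripsGo hotel acc (PySem.List.slice tour (some (s : Int)) (some (j : Int))) t
      = acc ++ tripsRec tour (s : Int)
          ((PySem.List.pyRange (j : Int) (tour.length : Int) 1).filter
            (fun i => decide (PySem.List.pyGetD tour i 0 < hotel))) := by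
  intro t
  induction t with
  | nil =>
    intro j s acc hdrop _
    have hj : (tour.length : Int) ≤ (j : Int) := by
      have := List.drop_eq_nil_iff.mp hdrop; exact_mod_cast this
    rw [PySem.List.pyRange_one_eq_nil hj]
    simp [tourTotripsGo, tripsRec]
  | cons x rest ih =>
    intro j s acc hdrop hs
    have hjlt : j < tour.length := by
      by_contra hcon
      have hnil : tour.drop j = [] := List.drop_eq_nil_iff.mpr (by omega)
      rw [hnil] at hdrop
      simp at hdrop
    have hdrop1 : tour.drop (j + 1) = rest := by
      have h1 := congrArg (List.drop 1) hdrop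
      rw [List.drop_drop] at h1
      simpa [Nat.add_comm] using h1
    have hx : tour.drop j = x :: tour.drop (j + 1) := by rw [hdrop, hdrop1]
    have hgetj : PySem.List.pyGetD tour (j : Int) 0 = x := by
      rw [PySem.List.pyGetD_natCast]
      have h0 : (tour.drop j)[0]? = some x := by rw [hx]; rfl
      rw [List.getElem?_drop] at h0
      simp only [Nat.add_zero] at h0
      simp [List.getD, h0]
    have hr : PySem.List.pyRange (j : Int) (tour.length : Int) 1
        = (j : Int) :: PySem.List.pyRange ((j : Int) + 1) (tour.length : Int) 1 :=
      PySem.List.pyRange_one_cons (by exact_mod_cast hjlt)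
    have hj1 : ((j : Int) + 1) = ((j + 1 : ℕ) : Int) := by push_cast; ring
    rw [hr]
    by_cases h : x < hotel
    · have hsingle : [x] = PySem.List.slice tour (some ((j : ℕ) : Int)) (some ((j + 1 : ℕ) : Int)) := by
        rw [PySem.List.slice_natCast, hx]
        simp [show j + 1 - j = 1 from by omega]
      have hstep : tourTotripsGo hotel acc
            (PySem.List.slice tour (some (s : Int)) (some (j : Int))) (x :: rest)
          = tourTotripsGo hotel
              (acc ++ [PySem.List.slice tour (some (s : Int)) (some (j : Int)) ++ [x]])
              [x] rest := by
        simp only [tourTotripsGo, if_pos h]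
      rw [hstep, ← slice_snoc tour s j x hx hs, hsingle,
        ih (j + 1) j _ hdrop1 (by omega)]
      simp only [List.filter_cons, hgetj, h, decide_true, if_true, tripsRec, hj1, List.append_assoc, List.singleton_append]
    · have hstep : tourTotripsGo hotel acc
            (PySem.List.slice tour (some (s : Int)) (some (j : Int))) (x :: rest)
          = tourTotripsGo hotel acc
              (PySem.List.slice tour (some (s : Int)) (some (j : Int)) ++ [x]) rest := by
        simp only [tourTotripsGo, if_neg h]
      rw [hstep, ← slice_snoc tour s j x hx hs,
        ih (j + 1) s _ hdrop1 (by omega)]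
      simp only [List.filter_cons, hgetj, h, decide_false, Bool.false_eq_true, if_false, hj1]

-- ===== VERDICT (by name: the statement is the Claim_ definition above) =====
theorem tourTotrips_spec : Claim_equal_tourTotrips := by
  intro tour hotel_number _
  unfold Spec_tourTotrips
  cases tour with
  | nil => rfl
  | cons h t =>
    simp only [tourTotrips, tourTotrips_alt]
    rw [foldA_eq_tripsRec, List.nil_append]
    have hg := goB_eq_tripsRec (h :: t) hotel_number t 1 0 [] (by simp) (by omega)
    simp only [Nat.cast_zero, Nat.cast_one, List.nil_append] at hg
    have hcur : PySem.List.slice (h :: t) (some (0 : Int)) (some (1 : Int)) = [h] := by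
      have := PySem.List.slice_natCast (xs := h :: t) (a := 0) (b := 1)
      simpa using this
    rw [hcur] at hg
    rw [hg]
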